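-- pv_equiv track=rewrite | github.com/Antriksh999/Job-Mail-and-analysis-agent | agent-4.py | _format_text_paragraphs
-- ===== SOURCE A (Python) =====
-- def _format_text_paragraphs(text):
--     """Format text into proper paragraphs"""
--     # Split into paragraphs and clean up
--     paragraphs = []
--     lines = text.split('\n')
--     current_paragraph = []
--
--     for line in lines:
--         line = line.strip()
--         if not line:
--             if current_paragraph:
--                 paragraphs.append(' '.join(current_paragraph))
--                 current_paragraph = []
--         else:
--             current_paragraph.append(line)
--
--     if current_paragraph:
--         paragraphs.append(' '.join(current_paragraph))
--
--     # Join paragraphs with double line breaks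
--     return '\n\n'.join(paragraphs)
-- ===== SOURCE B (Python) =====
-- def _format_text_paragraphs(text):
--     """Format text into proper paragraphs"""
--     lines = [l.strip() for l in text.split('\n')]
--     return '\n\n'.join(_paragraph_runs(lines))
--
--
-- def _paragraph_runs(lines):
--     # Partition the stripped lines into maximal runs of non-blank lines,
--     # joining each run with a single space; blank lines only separate runs.
--     if not lines:
--         return []
--     if lines[0] == '':
--         return _paragraph_runs(lines[1:])
--     k = 1
--     while k < len(lines) and lines[k] != '':
--         k += 1
--     return [' '.join(lines[:k])] + _paragraph_runs(lines[k:])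
-- ===== Notes on version B (the rewrite author's own statement) =====
-- stated objective: alternative
-- what changed: Replaces A's single pass with a current_paragraph accumulator and end-of-loop flush by a strip-all-lines-first pass followed by a recursive partition into maximal non-blank runs (take-run/drop-run), each run joined with a space.
import Mathlib
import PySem

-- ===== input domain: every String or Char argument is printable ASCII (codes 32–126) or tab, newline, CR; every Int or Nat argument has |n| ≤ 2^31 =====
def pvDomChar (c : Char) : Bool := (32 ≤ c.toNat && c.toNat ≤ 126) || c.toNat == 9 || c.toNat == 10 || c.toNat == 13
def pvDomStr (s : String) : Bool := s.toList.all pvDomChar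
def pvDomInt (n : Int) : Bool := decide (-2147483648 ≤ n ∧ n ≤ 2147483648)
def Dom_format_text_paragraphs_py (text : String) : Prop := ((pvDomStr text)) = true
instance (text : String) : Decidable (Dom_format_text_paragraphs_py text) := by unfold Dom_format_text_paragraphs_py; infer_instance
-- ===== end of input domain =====

-- B is an alternative decomposition of the same O(n) task: strip all lines first, then
-- recursively partition into maximal non-blank runs instead of A's accumulator-and-flush pass.

-- ===== PORT A =====
-- one iteration of A's for-loop: state = (paragraphs, current_paragraph)
def fmtAStep (st : List String × List String) (line : String) : List String × List String :=
  let line := PySem.Str.strip line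
  if line = "" then
    if st.2 ≠ [] then (st.1 ++ [PySem.Str.join " " st.2], []) else st
  else (st.1, st.2 ++ [line])

def format_text_paragraphs_py (text : String) : String :=
  let lines := (PySem.Str.split? text "\n").getD []
  let st := lines.foldl fmtAStep ([], [])
  let paragraphs := if st.2 ≠ [] then st.1 ++ [PySem.Str.join " " st.2] else st.1
  PySem.Str.join "\n\n" paragraphs

-- ===== PORT B =====
-- B's helper _paragraph_runs: lines[:k] / lines[k:] with k = end of the non-blank run
-- are takeWhile/dropWhile of the tail.
def paragraphRuns : List String → List String
  | [] => []
  | l :: ls =>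
    if l = "" then paragraphRuns ls
    else PySem.Str.join " " (l :: ls.takeWhile (· ≠ "")) :: paragraphRuns (ls.dropWhile (· ≠ ""))
  termination_by ls => ls.length
  decreasing_by
    all_goals simpa using Nat.lt_succ_of_le (List.length_dropWhile_le (fun s => s ≠ "") ls)

def format_text_paragraphs_py_alt (text : String) : String :=
  let lines := ((PySem.Str.split? text "\n").getD []).map PySem.Str.strip
  PySem.Str.join "\n\n" (paragraphRuns lines)

-- ===== PRECONDITION & SPEC =====
def Spec_format_text_paragraphs_py (text : String) (out : String) : Prop := out = format_text_paragraphs_py_alt text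
instance (text : String) (out : String) : Decidable (Spec_format_text_paragraphs_py text out) := by unfold Spec_format_text_paragraphs_py; infer_instance

-- ===== CLAIM (what is proved, stated in full; the proofs are below) =====
def Claim_equal_format_text_paragraphs_py : Prop := ∀ (text : String), Dom_format_text_paragraphs_py text → Spec_format_text_paragraphs_py text (format_text_paragraphs_py text)

-- ===== LEMMAS AND PROOFS =====

-- flush of A's final state
def fmtFlush (st : List String × List String) : List String :=
  if st.2 ≠ [] then st.1 ++ [PySem.Str.join " " st.2] else st.1

-- A's fold, run over already-stripped lines
def fmtStep (st : List String × List String) (line : String) : List String × List String :=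
  if line = "" then
    if st.2 ≠ [] then (st.1 ++ [PySem.Str.join " " st.2], []) else st
  else (st.1, st.2 ++ [line])

lemma foldl_fmtAStep_eq (ls : List String) (st : List String × List String) :
    ls.foldl fmtAStep st = (ls.map PySem.Str.strip).foldl fmtStep st := by
  induction ls generalizing st with
  | nil => rfl
  | cons l ls ih =>
    simp only [List.foldl_cons, List.map_cons, ih]
    rfl

-- the loop invariant, both for empty and non-empty current_paragraph
lemma foldl_fmtStep_char (ls : List String) :
    (∀ ps : List String, fmtFlush (ls.foldl fmtStep (ps, [])) = ps ++ paragraphRuns ls) ∧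
    (∀ (ps cur : List String), cur ≠ [] →
      fmtFlush (ls.foldl fmtStep (ps, cur)) =
        ps ++ PySem.Str.join " " (cur ++ ls.takeWhile (· ≠ "")) ::
          paragraphRuns (ls.dropWhile (· ≠ ""))) := by
  induction ls with
  | nil =>
    constructor
    · intro ps; simp [fmtFlush, paragraphRuns]
    · intro ps cur h; simp [fmtFlush, paragraphRuns, h]
  | cons l ls ih =>
    obtain ⟨ihE, ihN⟩ := ih
    constructor
    · intro ps
      by_cases hl : l = ""
      · simp [hl, List.foldl_cons, fmtStep, ihE ps, paragraphRuns]
      · simp only [List.foldl_cons, fmtStep, if_neg hl, List.nil_append]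
        rw [ihN ps [l] (by simp)]
        simp [paragraphRuns, hl]
    · intro ps cur h
      by_cases hl : l = ""
      · simp [List.foldl_cons, fmtStep, hl, h, ihE, paragraphRuns]
      · simp only [List.foldl_cons, fmtStep, if_neg hl]
        rw [ihN ps (cur ++ [l]) (by simp)]
        simp [hl]

-- ===== VERDICT (by name: the statement is the Claim_ definition above) =====
theorem format_text_paragraphs_py_spec : Claim_equal_format_text_paragraphs_py := by
  intro text _
  unfold Spec_format_text_paragraphs_py
  have h := (foldl_fmtStep_char (((PySem.Str.split? text "\n").getD []).map PySem.Str.strip)).1 []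
  simpa [format_text_paragraphs_py, format_text_paragraphs_py_alt, foldl_fmtAStep_eq, fmtFlush] using congrArg (PySem.Str.join "\n\n") h
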